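-- pv_equiv track=rewrite | github.com/Mr0Wido/otoattack | tools/src/bg-tools/cors.py | generate_domain_specific_commands
-- ===== SOURCE A (Python) =====
-- from typing import List, Optional
--
-- def generate_domain_specific_commands(target_list: str, domains: List[str]) -> List[str]:
--     """Generate domain-specific CORS test commands."""
--     commands = []
--     for domain in domains:
--         commands.extend([
--             # Test with domain prefix
--             f"cat {target_list} | while read url; do "
--             f"target=$(curl -s -I -H \"Origin: https://not{domain}\" -X GET \"$url\"); "
--             f"if echo \"$target\" | grep -q 'Access-Control-Allow-Origin: https://not{domain}'; then "
--             f"echo \"[CORS] $url - Origin: not{domain}\"; "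
--             f"fi; done",
--
--             # Test with domain suffix
--             f"cat {target_list} | while read url; do "
--             f"target=$(curl -s -I -H \"Origin: https://{domain}.evil.com\" -X GET \"$url\"); "
--             f"if echo \"$target\" | grep -q 'Access-Control-Allow-Origin: https://{domain}.evil.com'; then "
--             f"echo \"[CORS] $url - Origin: {domain}.evil.com\"; "
--             f"fi; done",
--
--             # Test with HTTP version
--             f"cat {target_list} | while read url; do "
--             f"target=$(curl -s -I -H \"Origin: http://{domain}\" -X GET \"$url\"); "
--             f"if echo \"$target\" | grep -q 'Access-Control-Allow-Origin: http://{domain}'; then "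
--             f"echo \"[CORS] $url - Origin: http://{domain}\"; "
--             f"fi; done",
--
--             # Test with port
--             f"cat {target_list} | while read url; do "
--             f"target=$(curl -s -I -H \"Origin: https://{domain}:8080\" -X GET \"$url\"); "
--             f"if echo \"$target\" | grep -q 'Access-Control-Allow-Origin: https://{domain}:8080'; then "
--             f"echo \"[CORS] $url - Origin: {domain}:8080\"; "
--             f"fi; done"
--         ])
--     return commands
-- ===== SOURCE B (Python) =====
-- from typing import List
--
-- _TEMPLATE = (
--     "cat {t} | while read url; do "
--     "target=$(curl -s -I -H \"Origin: {origin}\" -X GET \"$url\"); "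
--     "if echo \"$target\" | grep -q 'Access-Control-Allow-Origin: {origin}'; then "
--     "echo \"[CORS] $url - Origin: {label}\"; "
--     "fi; done"
-- )
--
-- def _origin_label_pairs(domain):
--     return [
--         (f"https://not{domain}", f"not{domain}"),
--         (f"https://{domain}.evil.com", f"{domain}.evil.com"),
--         (f"http://{domain}", f"http://{domain}"),
--         (f"https://{domain}:8080", f"{domain}:8080"),
--     ]
--
-- def generate_domain_specific_commands(target_list: str, domains: List[str]) -> List[str]:
--     return [
--         _TEMPLATE.format(t=target_list, origin=origin, label=label)
--         for domain in domains
--         for origin, label in _origin_label_pairs(domain)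
--     ]
-- ===== Notes on version B (the rewrite author's own statement) =====
-- stated objective: simpler
-- what changed: Replaces A's four repeated inline f-string commands per domain with a single shared command template instantiated over a data-driven (origin, label) pair table via a nested comprehension.
import Mathlib
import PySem

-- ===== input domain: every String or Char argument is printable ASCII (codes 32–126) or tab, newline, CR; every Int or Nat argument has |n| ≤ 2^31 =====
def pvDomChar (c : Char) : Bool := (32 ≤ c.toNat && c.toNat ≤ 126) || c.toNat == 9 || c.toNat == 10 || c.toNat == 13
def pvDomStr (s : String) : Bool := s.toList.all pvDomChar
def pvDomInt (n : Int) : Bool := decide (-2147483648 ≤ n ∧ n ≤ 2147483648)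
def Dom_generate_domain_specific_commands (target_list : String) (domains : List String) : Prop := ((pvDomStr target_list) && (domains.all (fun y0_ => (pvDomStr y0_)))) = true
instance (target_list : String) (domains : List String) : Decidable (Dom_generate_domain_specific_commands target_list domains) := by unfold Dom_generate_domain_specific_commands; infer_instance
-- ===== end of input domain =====

-- B replaces A's four inline per-domain command strings with a data-driven nested loop over
-- (origin, label) pairs and one shared command template (objective: simpler).

-- ===== PORT A =====
-- Literal transliteration of A: a loop extending `commands` with four f-string commands per domain.
def generate_domain_specific_commands (target_list : String) (domains : List String) : List String :=
  domains.foldl (fun commands domain =>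
    commands ++ ["cat "
        ++ target_list
        ++ " | while read url; do target=$(curl -s -I -H \"Origin: https://not"
        ++ domain
        ++ "\" -X GET \"$url\"); if echo \"$target\" | grep -q 'Access-Control-Allow-Origin: https://not"
        ++ domain
        ++ "'; then echo \"[CORS] $url - Origin: not"
        ++ domain
        ++ "\"; fi; done",
      "cat "
        ++ target_list
        ++ " | while read url; do target=$(curl -s -I -H \"Origin: https://"
        ++ domain
        ++ ".evil.com\" -X GET \"$url\"); if echo \"$target\" | grep -q 'Access-Control-Allow-Origin: https://"
        ++ domain
        ++ ".evil.com'; then echo \"[CORS] $url - Origin: "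
        ++ domain
        ++ ".evil.com\"; fi; done",
      "cat "
        ++ target_list
        ++ " | while read url; do target=$(curl -s -I -H \"Origin: http://"
        ++ domain
        ++ "\" -X GET \"$url\"); if echo \"$target\" | grep -q 'Access-Control-Allow-Origin: http://"
        ++ domain
        ++ "'; then echo \"[CORS] $url - Origin: http://"
        ++ domain
        ++ "\"; fi; done",
      "cat "
        ++ target_list
        ++ " | while read url; do target=$(curl -s -I -H \"Origin: https://"
        ++ domain
        ++ ":8080\" -X GET \"$url\"); if echo \"$target\" | grep -q 'Access-Control-Allow-Origin: https://"
        ++ domain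
        ++ ":8080'; then echo \"[CORS] $url - Origin: "
        ++ domain
        ++ ":8080\"; fi; done"]) []

-- ===== PORT B =====
-- B's shared template: the origin is substituted twice, the label once.
def pvTemplate (t origin label : String) : String :=
  "cat " ++ t ++ " | while read url; do target=$(curl -s -I -H \"Origin: "
    ++ origin ++ "\" -X GET \"$url\"); if echo \"$target\" | grep -q 'Access-Control-Allow-Origin: "
    ++ origin ++ "'; then echo \"[CORS] $url - Origin: " ++ label ++ "\"; fi; done"

-- B's (origin, label) table for one domain.
def pvOriginLabelPairs (domain : String) : List (String × String) :=
  [("https://not" ++ domain, "not" ++ domain),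
   ("https://" ++ domain ++ ".evil.com", domain ++ ".evil.com"),
   ("http://" ++ domain, "http://" ++ domain),
   ("https://" ++ domain ++ ":8080", domain ++ ":8080")]

def generate_domain_specific_commands_alt (target_list : String) (domains : List String) : List String :=
  domains.flatMap (fun domain =>
    (pvOriginLabelPairs domain).map (fun p => pvTemplate target_list p.1 p.2))

-- ===== PRECONDITION & SPEC =====
def Spec_generate_domain_specific_commands (target_list : String) (domains : List String) (out : List String) : Prop := out = generate_domain_specific_commands_alt target_list domains
instance (target_list : String) (domains : List String) (out : List String) : Decidable (Spec_generate_domain_specific_commands target_list domains out) := by unfold Spec_generate_domain_specific_commands; infer_instance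

-- ===== CLAIM (what is proved, stated in full; the proofs are below) =====
def Claim_equal_generate_domain_specific_commands : Prop := ∀ (target_list : String) (domains : List String), Dom_generate_domain_specific_commands target_list domains → Spec_generate_domain_specific_commands target_list domains (generate_domain_specific_commands target_list domains)

-- ===== LEMMAS AND PROOFS =====

-- String-literal gluing: re-associate and merge two adjacent literal pieces.
theorem pv_glue (a b c : String) (h : a ++ b = c) (x : String) : x ++ a ++ b = x ++ c := by
  rw [String.append_assoc, h]

theorem pv_eq1 (target_list domain : String) :
    pvTemplate target_list ("https://not" ++ domain) ("not" ++ domain) =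
      "cat "
        ++ target_list
        ++ " | while read url; do target=$(curl -s -I -H \"Origin: https://not"
        ++ domain
        ++ "\" -X GET \"$url\"); if echo \"$target\" | grep -q 'Access-Control-Allow-Origin: https://not"
        ++ domain
        ++ "'; then echo \"[CORS] $url - Origin: not"
        ++ domain
        ++ "\"; fi; done" := by
  unfold pvTemplate
  simp only [← String.append_assoc]
  rw [pv_glue " | while read url; do target=$(curl -s -I -H \"Origin: " "https://not" " | while read url; do target=$(curl -s -I -H \"Origin: https://not" rfl,
      pv_glue "\" -X GET \"$url\"); if echo \"$target\" | grep -q 'Access-Control-Allow-Origin: " "https://not" "\" -X GET \"$url\"); if echo \"$target\" | grep -q 'Access-Control-Allow-Origin: https://not" rfl,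
      pv_glue "'; then echo \"[CORS] $url - Origin: " "not" "'; then echo \"[CORS] $url - Origin: not" rfl]

theorem pv_eq2 (target_list domain : String) :
    pvTemplate target_list ("https://" ++ domain ++ ".evil.com") (domain ++ ".evil.com") =
      "cat "
        ++ target_list
        ++ " | while read url; do target=$(curl -s -I -H \"Origin: https://"
        ++ domain
        ++ ".evil.com\" -X GET \"$url\"); if echo \"$target\" | grep -q 'Access-Control-Allow-Origin: https://"
        ++ domain
        ++ ".evil.com'; then echo \"[CORS] $url - Origin: "
        ++ domain
        ++ ".evil.com\"; fi; done" := by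
  unfold pvTemplate
  simp only [← String.append_assoc]
  rw [pv_glue " | while read url; do target=$(curl -s -I -H \"Origin: " "https://" " | while read url; do target=$(curl -s -I -H \"Origin: https://" rfl,
      pv_glue ".evil.com" "\" -X GET \"$url\"); if echo \"$target\" | grep -q 'Access-Control-Allow-Origin: " ".evil.com\" -X GET \"$url\"); if echo \"$target\" | grep -q 'Access-Control-Allow-Origin: " rfl,
      pv_glue ".evil.com\" -X GET \"$url\"); if echo \"$target\" | grep -q 'Access-Control-Allow-Origin: " "https://" ".evil.com\" -X GET \"$url\"); if echo \"$target\" | grep -q 'Access-Control-Allow-Origin: https://" rfl,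
      pv_glue ".evil.com" "'; then echo \"[CORS] $url - Origin: " ".evil.com'; then echo \"[CORS] $url - Origin: " rfl,
      pv_glue ".evil.com" "\"; fi; done" ".evil.com\"; fi; done" rfl]

theorem pv_eq3 (target_list domain : String) :
    pvTemplate target_list ("http://" ++ domain) ("http://" ++ domain) =
      "cat "
        ++ target_list
        ++ " | while read url; do target=$(curl -s -I -H \"Origin: http://"
        ++ domain
        ++ "\" -X GET \"$url\"); if echo \"$target\" | grep -q 'Access-Control-Allow-Origin: http://"
        ++ domain
        ++ "'; then echo \"[CORS] $url - Origin: http://"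
        ++ domain
        ++ "\"; fi; done" := by
  unfold pvTemplate
  simp only [← String.append_assoc]
  rw [pv_glue " | while read url; do target=$(curl -s -I -H \"Origin: " "http://" " | while read url; do target=$(curl -s -I -H \"Origin: http://" rfl,
      pv_glue "\" -X GET \"$url\"); if echo \"$target\" | grep -q 'Access-Control-Allow-Origin: " "http://" "\" -X GET \"$url\"); if echo \"$target\" | grep -q 'Access-Control-Allow-Origin: http://" rfl,
      pv_glue "'; then echo \"[CORS] $url - Origin: " "http://" "'; then echo \"[CORS] $url - Origin: http://" rfl]

theorem pv_eq4 (target_list domain : String) :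
    pvTemplate target_list ("https://" ++ domain ++ ":8080") (domain ++ ":8080") =
      "cat "
        ++ target_list
        ++ " | while read url; do target=$(curl -s -I -H \"Origin: https://"
        ++ domain
        ++ ":8080\" -X GET \"$url\"); if echo \"$target\" | grep -q 'Access-Control-Allow-Origin: https://"
        ++ domain
        ++ ":8080'; then echo \"[CORS] $url - Origin: "
        ++ domain
        ++ ":8080\"; fi; done" := by
  unfold pvTemplate
  simp only [← String.append_assoc]
  rw [pv_glue " | while read url; do target=$(curl -s -I -H \"Origin: " "https://" " | while read url; do target=$(curl -s -I -H \"Origin: https://" rfl,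
      pv_glue ":8080" "\" -X GET \"$url\"); if echo \"$target\" | grep -q 'Access-Control-Allow-Origin: " ":8080\" -X GET \"$url\"); if echo \"$target\" | grep -q 'Access-Control-Allow-Origin: " rfl,
      pv_glue ":8080\" -X GET \"$url\"); if echo \"$target\" | grep -q 'Access-Control-Allow-Origin: " "https://" ":8080\" -X GET \"$url\"); if echo \"$target\" | grep -q 'Access-Control-Allow-Origin: https://" rfl,
      pv_glue ":8080" "'; then echo \"[CORS] $url - Origin: " ":8080'; then echo \"[CORS] $url - Origin: " rfl,
      pv_glue ":8080" "\"; fi; done" ":8080\"; fi; done" rfl]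

-- Per-domain: B's template applied to B's table yields exactly A's four inline strings.
theorem pv_per_domain (target_list domain : String) :
    (pvOriginLabelPairs domain).map (fun p => pvTemplate target_list p.1 p.2) =
      ["cat "
        ++ target_list
        ++ " | while read url; do target=$(curl -s -I -H \"Origin: https://not"
        ++ domain
        ++ "\" -X GET \"$url\"); if echo \"$target\" | grep -q 'Access-Control-Allow-Origin: https://not"
        ++ domain
        ++ "'; then echo \"[CORS] $url - Origin: not"
        ++ domain
        ++ "\"; fi; done",
       "cat "
        ++ target_list
        ++ " | while read url; do target=$(curl -s -I -H \"Origin: https://"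
        ++ domain
        ++ ".evil.com\" -X GET \"$url\"); if echo \"$target\" | grep -q 'Access-Control-Allow-Origin: https://"
        ++ domain
        ++ ".evil.com'; then echo \"[CORS] $url - Origin: "
        ++ domain
        ++ ".evil.com\"; fi; done",
       "cat "
        ++ target_list
        ++ " | while read url; do target=$(curl -s -I -H \"Origin: http://"
        ++ domain
        ++ "\" -X GET \"$url\"); if echo \"$target\" | grep -q 'Access-Control-Allow-Origin: http://"
        ++ domain
        ++ "'; then echo \"[CORS] $url - Origin: http://"
        ++ domain
        ++ "\"; fi; done",
       "cat "
        ++ target_list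
        ++ " | while read url; do target=$(curl -s -I -H \"Origin: https://"
        ++ domain
        ++ ":8080\" -X GET \"$url\"); if echo \"$target\" | grep -q 'Access-Control-Allow-Origin: https://"
        ++ domain
        ++ ":8080'; then echo \"[CORS] $url - Origin: "
        ++ domain
        ++ ":8080\"; fi; done"] := by
  simp only [pvOriginLabelPairs, List.map]
  rw [pv_eq1, pv_eq2, pv_eq3, pv_eq4]

-- ===== VERDICT (by name: the statement is the Claim_ definition above) =====
theorem generate_domain_specific_commands_spec : Claim_equal_generate_domain_specific_commands := by
  intro target_list domains _
  unfold Spec_generate_domain_specific_commands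
  unfold generate_domain_specific_commands generate_domain_specific_commands_alt
  rw [PySem.List.foldl_append_eq_flatMap, List.flatMap_def]
  exact congrArg List.flatten (congrArg (List.map · domains) (funext fun d => (pv_per_domain target_list d).symm))
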